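-- pv_equiv track=rewrite | github.com/cheshire1129/nabla-dna | python/dist.py | _get_resolution
-- ===== SOURCE A (Python) =====
-- def _get_resolution(dna):
--     nrfpixel = len(dna)
--     if nrfpixel == 1:
--         return 1
--
--     reshalf = 1
--     while True:
--         if reshalf * (reshalf - 1) + 1 == nrfpixel:
--             return reshalf * 2 - 1
--         elif reshalf * reshalf == nrfpixel:
--             return reshalf * 2
--         reshalf += 1
-- ===== SOURCE B (Python) =====
-- def _isqrt(n):
--     if n < 2:
--         return n
--     x = n
--     while True:
--         y = (x + n // x) // 2
--         if y >= x:
--             return x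
--         x = y
--
-- def _get_resolution(dna):
--     n = len(dna)
--     t = _isqrt(4 * n - 3)
--     if t * t == 4 * n - 3:
--         return t
--     return 2 * _isqrt(n)
-- ===== Notes on version B (the rewrite author's own statement) =====
-- stated objective: faster
-- what changed: Replaced A's linear scan over candidate half-resolutions by direct inversion: integer-sqrt of 4n-3 decides the odd-resolution quadratic, otherwise integer-sqrt of n gives the even resolution.
import Mathlib
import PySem

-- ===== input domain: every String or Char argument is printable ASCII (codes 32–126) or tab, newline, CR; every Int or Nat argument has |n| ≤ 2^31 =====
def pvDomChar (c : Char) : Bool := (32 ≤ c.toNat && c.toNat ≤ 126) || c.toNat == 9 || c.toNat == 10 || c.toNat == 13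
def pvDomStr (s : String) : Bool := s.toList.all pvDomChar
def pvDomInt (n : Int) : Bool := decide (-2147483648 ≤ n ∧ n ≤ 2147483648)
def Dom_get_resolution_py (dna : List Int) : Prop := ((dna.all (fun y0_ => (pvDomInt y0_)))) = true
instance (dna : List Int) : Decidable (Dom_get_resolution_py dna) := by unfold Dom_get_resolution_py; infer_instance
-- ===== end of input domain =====

-- B inverts the two quadratic match conditions with an integer square root (Newton) instead of A's linear scan over reshalf.

-- ===== PORT A =====
-- A's unbounded while loop, ported with fuel; under Pre_ the match is found before the fuel runs out.
def pyLoopA (n : Nat) (reshalf : Nat) (fuel : Nat) : Int :=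
  match fuel with
  | 0 => 0
  | fuel + 1 =>
    if reshalf * (reshalf - 1) + 1 = n then 2 * (reshalf : Int) - 1
    else if reshalf * reshalf = n then 2 * (reshalf : Int)
    else pyLoopA n (reshalf + 1) fuel

def get_resolution_py (dna : List Int) : Int :=
  let nrfpixel := dna.length
  if nrfpixel = 1 then 1
  else pyLoopA nrfpixel 1 (nrfpixel + 2)

-- ===== PORT B =====
-- Newton integer square root, exactly Source B's _isqrt loop (x decreases each iteration).
def isqrtLoop (n : Nat) (x : Nat) : Nat :=
  let y := (x + n / x) / 2
  if _h : y < x then isqrtLoop n y else x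
termination_by x

def pyIsqrt (n : Nat) : Nat := if n < 2 then n else isqrtLoop n n

def get_resolution_py_alt (dna : List Int) : Int :=
  let n := dna.length
  let t := pyIsqrt (4 * n - 3)
  if t * t = 4 * n - 3 then (t : Int)
  else 2 * (pyIsqrt n : Int)

-- ===== PRECONDITION & SPEC =====
-- Pre_ excludes exactly the lengths on which A's while loop never matches and A diverges:
-- A returns iff the pixel count is r*r or r*(r-1)+1 for some r ≥ 1, i.e. n or 4n-3 is a perfect square (n ≥ 1).
def Pre_get_resolution_py (dna : List Int) : Prop :=
  1 ≤ dna.length ∧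
    ∃ r ≤ dna.length, r * r = dna.length ∨ r * (r - 1) + 1 = dna.length
instance (dna : List Int) : Decidable (Pre_get_resolution_py dna) := by
  unfold Pre_get_resolution_py; infer_instance

def pvWitness_get_resolution_py : List Int := [0, 1, 2, 0]

def Spec_get_resolution_py (dna : List Int) (out : Int) : Prop := out = get_resolution_py_alt dna
instance (dna : List Int) (out : Int) : Decidable (Spec_get_resolution_py dna out) := by
  unfold Spec_get_resolution_py; infer_instance

-- ===== CLAIM (what is proved, stated in full; the proofs are below) =====
def Claim_equal_get_resolution_py : Prop := ∀ (dna : List Int), Dom_get_resolution_py dna → Pre_get_resolution_py dna → Spec_get_resolution_py dna (get_resolution_py dna)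

-- ===== LEMMAS AND PROOFS =====

-- Newton step never drops below the integer square root.
lemma newton_step_ge (n x : Nat) (hx : Nat.sqrt n ≤ x) :
    Nat.sqrt n ≤ (x + n / x) / 2 := by
  set s := Nat.sqrt n with hs
  by_cases h2 : 2 * s ≤ x
  · have h1 : s ≤ x / 2 := (Nat.le_div_iff_mul_le (by omega)).2 (by omega)
    exact h1.trans (Nat.div_le_div_right (Nat.le_add_right _ _))
  · have hx0 : 0 < x := by omega
    have hsq : s * s ≤ n := by
      have := Nat.sqrt_le' n
      simpa [hs, pow_two] using this
    have hxs : x ≤ 2 * s := by omega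
    have hkey : (2 * s - x) * x ≤ n := by
      have h3 : (2 * s - x) + x = 2 * s := by omega
      have : (2 * s - x) * x ≤ s * s := by
        zify
        nlinarith [sq_nonneg ((2 * s - x : ℤ) - x), h3]
      omega
    have hdiv : 2 * s - x ≤ n / x := (Nat.le_div_iff_mul_le hx0).2 hkey
    have : 2 * s ≤ x + n / x := by omega
    omega

lemma isqrtLoop_eq (n : Nat) (hn : 2 ≤ n) :
    ∀ x, Nat.sqrt n ≤ x → isqrtLoop n x = Nat.sqrt n := by
  intro x
  induction x using Nat.strong_induction_on with
  | _ x ih =>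
    intro hx
    have hs1 : 1 ≤ Nat.sqrt n := Nat.sqrt_pos.2 (by omega)
    have hx0 : 0 < x := by omega
    rw [isqrtLoop]
    split
    · next h =>
      exact ih _ h (newton_step_ge n x hx)
    · next h =>
      have hle : x ≤ (x + n / x) / 2 := by omega
      have h2x : x * 2 ≤ x + n / x := (Nat.le_div_iff_mul_le (by omega)).1 hle
      have hxd : x ≤ n / x := by omega
      have hxx : x * x ≤ n := (Nat.le_div_iff_mul_le hx0).1 hxd
      have : x ≤ Nat.sqrt n := Nat.le_sqrt.2 (by nlinarith)
      omega

lemma pyIsqrt_eq (n : Nat) : pyIsqrt n = Nat.sqrt n := by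
  unfold pyIsqrt
  split
  · next h => interval_cases n <;> decide
  · next h => exact isqrtLoop_eq n (by omega) n (Nat.sqrt_le_self n)

-- A's loop reaches the first matching reshalf.
lemma loopA_eq (n : Nat) : ∀ fuel r rt (out : Int), r ≤ rt → rt < r + fuel →
    (∀ q, r ≤ q → q < rt → q * (q - 1) + 1 ≠ n ∧ q * q ≠ n) →
    ((rt * (rt - 1) + 1 = n ∧ out = 2 * (rt : Int) - 1) ∨
     (rt * (rt - 1) + 1 ≠ n ∧ rt * rt = n ∧ out = 2 * (rt : Int))) →
    pyLoopA n r fuel = out := by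
  intro fuel
  induction fuel with
  | zero => intro r rt out h1 h2 _ _; omega
  | succ f ih =>
    intro r rt out h1 h2 hbelow hcond
    rw [pyLoopA]
    by_cases hr : r = rt
    · subst hr
      rcases hcond with ⟨hc, ho⟩ | ⟨hc1, hc2, ho⟩
      · simp [hc, ho]
      · simp [hc1, hc2, ho]
    · have hlt : r < rt := by omega
      have hb := hbelow r (le_refl r) hlt
      rw [if_neg hb.1, if_neg hb.2]
      exact ih (r + 1) rt out (by omega) (by omega)
        (fun q hq1 hq2 => hbelow q (by omega) hq2) hcond

lemma mul_self_inj' (a b : Nat) (h : a * a = b * b) : a = b := by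
  rcases lt_trichotomy a b with h1 | h1 | h1
  · nlinarith
  · exact h1
  · nlinarith

-- the whole equivalence, stated over the pixel count n
lemma main_nat (n : Nat) (hn1 : 1 ≤ n)
    (hcase : Nat.sqrt n * Nat.sqrt n = n ∨
      Nat.sqrt (4 * n - 3) * Nat.sqrt (4 * n - 3) = 4 * n - 3) :
    (if n = 1 then (1 : Int) else pyLoopA n 1 (n + 2)) =
    (if pyIsqrt (4 * n - 3) * pyIsqrt (4 * n - 3) = 4 * n - 3
      then ((pyIsqrt (4 * n - 3) : Nat) : Int)
      else 2 * ((pyIsqrt n : Nat) : Int)) := by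
  by_cases h1 : n = 1
  · subst h1; norm_num [pyIsqrt_eq]
  · rw [if_neg h1]
    have hn2 : 2 ≤ n := by omega
    rw [pyIsqrt_eq, pyIsqrt_eq]
    by_cases hodd : Nat.sqrt (4 * n - 3) * Nat.sqrt (4 * n - 3) = 4 * n - 3
    · -- odd resolution
      rw [if_pos hodd]
      set t := Nat.sqrt (4 * n - 3) with ht
      have h4n : 4 * n = t * t + 3 := ((Nat.sub_eq_iff_eq_add (by omega)).1 hodd.symm)
      have ht3 : 3 ≤ t := by
        rcases Nat.lt_or_ge t 3 with h | h
        · interval_cases t <;> omega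
        · exact h
      obtain ⟨k, hk⟩ : ∃ k, t = 2 * k + 1 := by
        rcases Nat.even_or_odd t with he | ho
        · obtain ⟨j, hj⟩ := he
          exfalso
          have : t * t = 4 * (j * j) := by rw [hj]; ring
          omega
        · obtain ⟨j, hj⟩ := ho
          exact ⟨j, hj⟩
      have hk1 : 1 ≤ k := by omega
      have hkn : 4 * n = 4 * (k * k) + 4 * k + 4 := by
        rw [h4n, hk]; ring
      have hnk : n = k * k + k + 1 := by omega
      have hcond1 : (k + 1) * ((k + 1) - 1) + 1 = n := by
        simp
        nlinarith
      rw [loopA_eq n (n + 2) 1 (k + 1) ((t : Int)) (by omega) (by nlinarith) ?_ ?_]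
      · intro q hq1 hq2
        obtain ⟨m, hm⟩ : ∃ m, q = m + 1 := ⟨q - 1, by omega⟩
        subst hm
        constructor
        · intro hc
          simp at hc
          have h2 : (2 * m + 1) * (2 * m + 1) = t * t := by nlinarith
          have := mul_self_inj' (2 * m + 1) t h2
          omega
        · intro hc
          have h2 : (2 * (m + 1)) * (2 * (m + 1)) = t * t + 3 := by nlinarith
          rcases Nat.lt_or_ge (2 * (m + 1)) (t + 1) with h | h
          · nlinarith
          · nlinarith
      · left
        refine ⟨hcond1, ?_⟩
        push_cast
        omega
    · -- even resolution: n is a perfect square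
      rw [if_neg hodd]
      have hsq : Nat.sqrt n * Nat.sqrt n = n := by
        rcases hcase with h | h
        · exact h
        · exact absurd h hodd
      set s := Nat.sqrt n with hs
      have hs2 : 2 ≤ s := by
        rcases Nat.lt_or_ge s 2 with h | h
        · interval_cases s <;> omega
        · exact h
      rw [loopA_eq n (n + 2) 1 s (2 * (s : Int)) (by omega)
        (by have := Nat.sqrt_le_self n; omega) ?_ ?_]
      · intro q hq1 hq2
        constructor
        · intro hc
          apply hodd
          obtain ⟨m, hm⟩ : ∃ m, q = m + 1 := ⟨q - 1, by omega⟩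
          subst hm
          simp at hc
          have h4n : 4 * n = (2 * m + 1) * (2 * m + 1) + 3 := by nlinarith
          have hsub : 4 * n - 3 = (2 * m + 1) * (2 * m + 1) := by
            rw [h4n]; exact Nat.add_sub_cancel _ _
          rw [hsub, Nat.sqrt_eq]
        · intro hc
          nlinarith
      · right
        refine ⟨?_, hsq, rfl⟩
        intro hc
        obtain ⟨m, hm⟩ : ∃ m, s = m + 1 := ⟨s - 1, by omega⟩
        rw [hm] at hc hsq
        simp at hc
        nlinarith

-- Pre_'s bounded existential implies the square-root characterisation main_nat needs.
lemma pre_bridge (n : Nat) (hn1 : 1 ≤ n)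
    (h : ∃ r ≤ n, r * r = n ∨ r * (r - 1) + 1 = n) :
    Nat.sqrt n * Nat.sqrt n = n ∨
      Nat.sqrt (4 * n - 3) * Nat.sqrt (4 * n - 3) = 4 * n - 3 := by
  obtain ⟨r, _hr, h | h⟩ := h
  · left; rw [← h, Nat.sqrt_eq]
  · obtain ⟨m, hm⟩ | h0 : (∃ m, r = m + 1) ∨ r = 0 := by
      rcases r with _ | m
      · exact Or.inr rfl
      · exact Or.inl ⟨m, rfl⟩
    · subst hm
      simp at h
      right
      have h4 : 4 * n = (2 * m + 1) * (2 * m + 1) + 3 := by nlinarith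
      have hsub : 4 * n - 3 = (2 * m + 1) * (2 * m + 1) := by
        rw [h4]; exact Nat.add_sub_cancel _ _
      rw [hsub, Nat.sqrt_eq]
    · subst h0
      simp at h
      left
      rw [← h]
      simpa using Nat.sqrt_eq 1

-- ===== VERDICT (by name: the statement is the Claim_ definition above) =====
theorem get_resolution_py_spec : Claim_equal_get_resolution_py := by
  intro dna _hdom hpre
  obtain ⟨hn1, hex⟩ := hpre
  unfold Spec_get_resolution_py get_resolution_py get_resolution_py_alt
  exact main_nat dna.length hn1 (pre_bridge dna.length hn1 hex)
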